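-- pv_equiv track=rewrite | github.com/KateParshina/CipherDecryption | preprocessing.py | filter_not_alphabet
-- ===== SOURCE A (Python) =====
-- from string import ascii_lowercase
--
-- def filter_not_alphabet(text: str):
--     new_text = ""
--
--     for word in text.split():
--         new_word = ""
--         for ch in word:
--             if ch in ascii_lowercase:
--                 new_word += ch
--
--         if new_word:
--             new_text += f"{new_word} "
--
--     return new_text.strip()
-- ===== SOURCE B (Python) =====
-- from string import ascii_lowercase
--
-- def filter_not_alphabet(text: str):
--     filtered = ''.join(ch for ch in text if ch in ascii_lowercase or ch.isspace())
--     return ' '.join(filtered.split())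
-- ===== Notes on version B (the rewrite author's own statement) =====
-- stated objective: simpler
-- what changed: B inverts A's order: instead of splitting first and filtering each word with nested loops plus a trailing-space-and-strip accumulator, B filters the whole string once (keeping lowercase letters and whitespace) and then splits the filtered string and joins the words with single spaces, letting split collapse whitespace runs and drop emptied words.
import Mathlib
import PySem

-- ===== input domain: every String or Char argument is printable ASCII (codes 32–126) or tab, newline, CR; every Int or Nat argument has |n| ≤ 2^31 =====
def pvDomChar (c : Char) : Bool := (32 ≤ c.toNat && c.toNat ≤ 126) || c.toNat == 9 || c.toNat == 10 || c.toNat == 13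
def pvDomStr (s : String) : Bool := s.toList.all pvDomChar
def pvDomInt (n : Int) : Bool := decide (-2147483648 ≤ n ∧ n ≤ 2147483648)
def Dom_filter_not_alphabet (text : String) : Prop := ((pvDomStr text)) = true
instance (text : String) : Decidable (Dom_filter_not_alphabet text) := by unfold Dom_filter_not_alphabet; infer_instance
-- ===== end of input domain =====

-- B filters the whole string in one pass (keeping lowercase letters and whitespace) and lets
-- split()/join rebuild the words, instead of A's split-first nested word/char loops; objective: simpler.

-- `ascii_lowercase` from the `string` module
def pvLowercase : List Char := "abcdefghijklmnopqrstuvwxyz".toList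

-- ===== PORT A =====
def filter_not_alphabet (text : String) : String :=
  -- for word in text.split(): build new_word char by char, append "new_word " if nonempty
  let newText : List Char :=
    (PySem.Chars.split₀ text.toList).foldl
      (fun newText word =>
        let newWord : List Char :=
          word.foldl (fun newWord ch =>
            if pvLowercase.contains ch then newWord ++ [ch] else newWord) []
        if newWord.isEmpty then newText else newText ++ newWord ++ [' ']) []
  String.ofList (PySem.Chars.strip newText)

-- ===== PORT B =====
def filter_not_alphabet_alt (text : String) : String :=
  -- filtered = ''.join(ch for ch in text if ch in ascii_lowercase or ch.isspace())
  let filtered : List Char :=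
    text.toList.filter (fun ch => pvLowercase.contains ch || PySem.Chars.isspace ch)
  -- return ' '.join(filtered.split())
  String.ofList (PySem.Chars.join [' '] (PySem.Chars.split₀ filtered))

-- ===== PRECONDITION & SPEC =====
def Spec_filter_not_alphabet (text : String) (out : String) : Prop := out = filter_not_alphabet_alt text
instance (text : String) (out : String) : Decidable (Spec_filter_not_alphabet text out) := by unfold Spec_filter_not_alphabet; infer_instance

-- ===== CLAIM (what is proved, stated in full; the proofs are below) =====
def Claim_equal_filter_not_alphabet : Prop := ∀ (text : String), Dom_filter_not_alphabet text → Spec_filter_not_alphabet text (filter_not_alphabet text)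

-- ===== LEMMAS AND PROOFS =====

-- proof-only abbreviations
def pvIsLow (c : Char) : Bool := pvLowercase.contains c
def pvKeep (c : Char) : Bool := pvLowercase.contains c || PySem.Chars.isspace c
def pvF (w : List Char) : List Char := w.filter pvIsLow
def pvG (w : List Char) : List Char := if (pvF w).isEmpty then [] else pvF w ++ [' ']
def pvNoSpace (w : List Char) : Prop := ∀ c ∈ w, PySem.Chars.isspace c = false

theorem pvIsLow_bounds {c : Char} (h : pvIsLow c = true) : 97 ≤ c.toNat ∧ c.toNat ≤ 122 := by
  simp [pvIsLow, pvLowercase, List.contains_eq_mem] at h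
  rcases h with h|h|h|h|h|h|h|h|h|h|h|h|h|h|h|h|h|h|h|h|h|h|h|h|h|h <;> subst h <;> decide

theorem pvIsLow_not_space {c : Char} (h : pvIsLow c = true) : PySem.Chars.isspace c = false := by
  obtain ⟨h1, h2⟩ := pvIsLow_bounds h
  simp [PySem.Chars.isspace]
  omega

-- unfolding lemmas for split₀'s worker
theorem pvGo_nil (cur : List Char) (acc : List (List Char)) :
    PySem.Chars.split₀.go [] cur acc =
      if cur.isEmpty then acc.reverse else (cur.reverse :: acc).reverse := rfl

theorem pvGo_space {c : Char} (rest cur : List Char) (acc : List (List Char))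
    (hs : PySem.Chars.isspace c = true) :
    PySem.Chars.split₀.go (c :: rest) cur acc =
      if cur.isEmpty then PySem.Chars.split₀.go rest [] acc
      else PySem.Chars.split₀.go rest [] (cur.reverse :: acc) := by
  simp only [PySem.Chars.split₀.go]
  simp [hs]

theorem pvGo_nospace {c : Char} (rest cur : List Char) (acc : List (List Char))
    (hs : PySem.Chars.isspace c = false) :
    PySem.Chars.split₀.go (c :: rest) cur acc =
      PySem.Chars.split₀.go rest (c :: cur) acc := by
  simp only [PySem.Chars.split₀.go]
  simp [hs]

theorem pvGo_acc (s : List Char) : ∀ (cur : List Char) (acc : List (List Char)),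
    PySem.Chars.split₀.go s cur acc = acc.reverse ++ PySem.Chars.split₀.go s cur [] := by
  induction s with
  | nil =>
    intro cur acc
    rw [pvGo_nil, pvGo_nil]
    by_cases hc : cur.isEmpty = true <;> simp [hc]
  | cons c rest ih =>
    intro cur acc
    cases hs : PySem.Chars.isspace c with
    | true =>
      rw [pvGo_space rest cur acc hs, pvGo_space rest cur [] hs]
      by_cases hc : cur.isEmpty = true
      · simp only [hc, if_pos]
        exact ih [] acc
      · simp only [hc, Bool.false_eq_true, if_neg, not_false_iff]
        rw [ih [] (cur.reverse :: acc), ih [] [cur.reverse]]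
        simp
    | false =>
      rw [pvGo_nospace rest cur acc hs, pvGo_nospace rest cur [] hs]
      exact ih _ acc

-- B side: splitting the pre-filtered string = filtering each word of the split, dropping empties
theorem pvSplit_filter (cs : List Char) : ∀ (cur : List Char),
    PySem.Chars.split₀.go (cs.filter pvKeep) (cur.filter pvIsLow) [] =
      ((PySem.Chars.split₀.go cs cur []).map pvF).filter (fun w => !w.isEmpty) := by
  induction cs with
  | nil =>
    intro cur
    simp only [List.filter_nil]
    rw [pvGo_nil, pvGo_nil]
    by_cases hc : cur.isEmpty = true
    · have : cur = [] := List.isEmpty_iff.mp hc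
      subst this; simp
    · simp only [hc, Bool.false_eq_true, if_neg, not_false_iff]
      by_cases hf : (cur.filter pvIsLow).isEmpty = true
      · simp [pvF, List.filter_reverse, List.isEmpty_iff.mp hf]
      · have hne : cur.filter pvIsLow ≠ [] := fun h => by simp [h] at hf
        simp [hf, pvF, List.filter_reverse]
  | cons c rest ih =>
    intro cur
    by_cases hl : pvIsLow c = true
    · have hk : pvKeep c = true := by simp [pvKeep, pvIsLow, List.contains_eq_mem] at hl ⊢; exact Or.inl hl
      have hs : PySem.Chars.isspace c = false := pvIsLow_not_space hl
      simp only [List.filter_cons, hk, if_pos]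
      rw [pvGo_nospace _ _ _ hs, pvGo_nospace _ _ _ hs]
      have h1 : c :: List.filter pvIsLow cur = List.filter pvIsLow (c :: cur) := by
        simp [hl]
      rw [h1, ih (c :: cur)]
    · by_cases hs : PySem.Chars.isspace c = true
      · have hk : pvKeep c = true := by simp [pvKeep, hs]
        simp only [List.filter_cons, hk, if_pos]
        rw [pvGo_space _ _ _ hs, pvGo_space _ _ _ hs]
        by_cases hc : cur.isEmpty = true
        · have : cur = [] := List.isEmpty_iff.mp hc
          subst this
          simpa using ih []
        · simp only [hc, Bool.false_eq_true, if_neg, not_false_iff]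
          rw [pvGo_acc _ [] [cur.reverse]]
          by_cases hf : (cur.filter pvIsLow).isEmpty = true
          · simp only [hf, if_pos]
            have h0 : List.filter pvIsLow [] = ([] : List Char) := rfl
            rw [← h0, ih []]
            simp [pvF, List.filter_reverse, List.isEmpty_iff.mp hf]
          · simp only [hf, Bool.false_eq_true, if_neg, not_false_iff]
            rw [pvGo_acc _ [] [(cur.filter pvIsLow).reverse]]
            have h0 : List.filter pvIsLow [] = ([] : List Char) := rfl
            conv_lhs => rw [← h0]
            rw [ih []]
            have hne : cur.filter pvIsLow ≠ [] := fun h => by simp [h] at hf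
            simp [pvF, List.filter_reverse, hne]
      · have hk : pvKeep c = false := by
          simp [pvKeep, pvIsLow, List.contains_eq_mem] at hl hs ⊢
          exact ⟨hl, hs⟩
        simp only [List.filter_cons, hk, Bool.false_eq_true, if_neg, not_false_iff]
        rw [pvGo_nospace _ _ _ (by simpa using hs)]
        have h1 : List.filter pvIsLow cur = List.filter pvIsLow (c :: cur) := by
          simp [hl]
        rw [h1, ih (c :: cur)]

-- A side: the inner char loop is a filter
theorem pvInner (w : List Char) :
    w.foldl (fun newWord ch => if pvLowercase.contains ch then newWord ++ [ch] else newWord) [] = pvF w := by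
  have := PySem.List.foldl_append_if pvIsLow id w []
  simpa [pvIsLow, pvF] using this

-- A side: the outer loop appends pvG of each word
theorem pvOuter (L : List (List Char)) : ∀ (init : List Char),
    L.foldl
      (fun newText word =>
        let newWord : List Char :=
          word.foldl (fun newWord ch =>
            if pvLowercase.contains ch then newWord ++ [ch] else newWord) []
        if newWord.isEmpty then newText else newText ++ newWord ++ [' ']) init
      = init ++ L.flatMap pvG := by
  induction L with
  | nil => intro init; simp
  | cons w rest ih =>
    intro init
    rw [List.foldl_cons, List.flatMap_cons]
    have hstep : (let newWord : List Char := List.foldl (fun newWord ch => if pvLowercase.contains ch then newWord ++ [ch] else newWord) [] w; if newWord.isEmpty then init else init ++ newWord ++ [' ']) = init ++ pvG w := by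
      simp only [pvInner w, pvG]
      by_cases hf : (pvF w).isEmpty = true
      · simp [hf]
      · simp [hf]
    rw [hstep, ih]
    simp

theorem pvFlatMap_G (L : List (List Char)) :
    L.flatMap pvG = ((L.map pvF).filter (fun w => !w.isEmpty)).flatMap (fun w => w ++ [' ']) := by
  induction L with
  | nil => rfl
  | cons w rest ih =>
    simp only [List.flatMap_cons, List.map_cons, List.filter_cons]
    by_cases hf : (pvF w).isEmpty = true
    · simp [pvG, hf, ih]
    · simp [pvG, hf, ih]

theorem pvDropWhile_nospace {w : List Char} (h : pvNoSpace w) :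
    List.dropWhile PySem.Chars.isspace w = w := by
  cases w with
  | nil => rfl
  | cons c t =>
    rw [List.dropWhile_cons]
    simp [h c (by simp)]

theorem pvIntercalate_cons (w x : List Char) (rest : List (List Char)) :
    List.intercalate [' '] (w :: x :: rest) = w ++ [' '] ++ List.intercalate [' '] (x :: rest) := by
  simp [List.intercalate, List.intersperse]

theorem pvIntercalate_singleton (w : List Char) : List.intercalate [' '] [w] = w := by
  simp [List.intercalate, List.intersperse]

theorem pvIntercalate_ne_nil (x : List Char) (rest : List (List Char)) (hx : x ≠ []) :
    List.intercalate [' '] (x :: rest) ≠ [] := by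
  cases rest with
  | nil => simpa [pvIntercalate_singleton]
  | cons y r =>
    rw [pvIntercalate_cons]
    simp [hx]

theorem pvRstrip_words (L : List (List Char)) (hne : ∀ w ∈ L, w ≠ [])
    (hns : ∀ w ∈ L, pvNoSpace w) :
    List.dropWhile PySem.Chars.isspace (L.flatMap (fun w => w ++ [' '])).reverse
      = (List.intercalate [' '] L).reverse := by
  induction L with
  | nil => rfl
  | cons w rest ih =>
    have hwns : pvNoSpace w := hns w (by simp)
    cases rest with
    | nil =>
      simp only [List.flatMap_cons, List.flatMap_nil, List.append_nil]
      rw [show (w ++ [' ']).reverse = ' ' :: w.reverse by simp, List.dropWhile_cons]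
      simp only [show PySem.Chars.isspace ' ' = true from rfl, if_pos]
      rw [pvDropWhile_nospace (by intro c hc; exact hwns c (by simpa using hc))]
      rw [pvIntercalate_singleton]
    | cons x rest' =>
      have hF : List.flatMap (fun w => w ++ [' ']) (w :: x :: rest')
          = (w ++ [' ']) ++ List.flatMap (fun w => w ++ [' ']) (x :: rest') := by
        simp
      rw [hF, List.reverse_append, List.dropWhile_append]
      rw [ih (fun u hu => hne u (by simp [hu])) (fun u hu => hns u (by simp [hu]))]
      have hxne : x ≠ [] := hne x (by simp)
      have : ((List.intercalate [' '] (x :: rest')).reverse).isEmpty = false := by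
        simp [pvIntercalate_ne_nil x rest' hxne]
      rw [this]
      simp only [Bool.false_eq_true, if_neg, not_false_iff]
      rw [pvIntercalate_cons]
      simp

-- A side: strip of "each word plus a trailing space" is the single-space join
theorem pvStrip_words (L : List (List Char)) (hne : ∀ w ∈ L, w ≠ [])
    (hns : ∀ w ∈ L, pvNoSpace w) :
    PySem.Chars.strip (L.flatMap (fun w => w ++ [' '])) = List.intercalate [' '] L := by
  unfold PySem.Chars.strip PySem.Chars.lstrip PySem.Chars.rstrip
  have hl : List.dropWhile PySem.Chars.isspace (L.flatMap (fun w => w ++ [' ']))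
      = L.flatMap (fun w => w ++ [' ']) := by
    cases L with
    | nil => rfl
    | cons w rest =>
      have hw : w ≠ [] := hne w (by simp)
      obtain ⟨c, t, rfl⟩ : ∃ c t, w = c :: t := by
        cases w with
        | nil => exact absurd rfl hw
        | cons c t => exact ⟨c, t, rfl⟩
      have hc : PySem.Chars.isspace c = false := hns (c :: t) (by simp) c (by simp)
      simp only [List.flatMap_cons, List.cons_append, List.dropWhile_cons, hc]
      simp
  rw [hl, pvRstrip_words L hne hns, List.reverse_reverse]

theorem pv_main (text : String) : filter_not_alphabet text = filter_not_alphabet_alt text := by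
  unfold filter_not_alphabet filter_not_alphabet_alt
  have hW : PySem.Chars.split₀ text.toList = PySem.Chars.split₀.go text.toList [] [] := rfl
  set T := text.toList with hT
  set L : List (List Char) :=
    ((PySem.Chars.split₀.go T [] []).map pvF).filter (fun w => !w.isEmpty) with hL
  have hne : ∀ w ∈ L, w ≠ [] := by
    intro w hw
    have := (List.mem_filter.mp hw).2
    simpa [List.isEmpty_iff] using this
  have hns : ∀ w ∈ L, pvNoSpace w := by
    intro w hw c hc
    have hmap := (List.mem_filter.mp hw).1
    obtain ⟨u, _, rfl⟩ := List.mem_map.mp hmap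
    have : pvIsLow c = true := (List.mem_filter.mp hc).2
    exact pvIsLow_not_space this
  have hA : PySem.Chars.strip
      ((PySem.Chars.split₀ T).foldl
        (fun newText word =>
          let newWord : List Char :=
            word.foldl (fun newWord ch =>
              if pvLowercase.contains ch then newWord ++ [ch] else newWord) []
          if newWord.isEmpty then newText else newText ++ newWord ++ [' ']) [])
      = List.intercalate [' '] L := by
    rw [pvOuter, List.nil_append, pvFlatMap_G, hW, pvStrip_words L hne hns]
  have hB : PySem.Chars.join [' ']
      (PySem.Chars.split₀ (T.filter (fun ch => pvLowercase.contains ch || PySem.Chars.isspace ch)))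
      = List.intercalate [' '] L := by
    have hkeep : (fun ch => pvLowercase.contains ch || PySem.Chars.isspace ch) = pvKeep := rfl
    have h0 : List.filter pvIsLow [] = ([] : List Char) := rfl
    show PySem.Chars.join [' '] (PySem.Chars.split₀.go (T.filter _) [] []) = _
    rw [hkeep]
    conv_lhs => rw [← h0]
    rw [pvSplit_filter T []]
    rfl
  exact congrArg String.ofList (hA.trans hB.symm)

-- ===== VERDICT (by name: the statement is the Claim_ definition above) =====
theorem filter_not_alphabet_spec : Claim_equal_filter_not_alphabet := by
  intro text _
  exact pv_main text
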